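-- pv_equiv track=rewrite | github.com/zilahir/advencofcode2024 | 5/main.py | process_task
-- ===== SOURCE A (Python) =====
-- from collections import defaultdict, deque
--
-- def build_graph(rules):
--     graph = defaultdict(list)
--     in_degree = defaultdict(int)
--
--     for rule in rules:
--         x, y = rule
--         graph[x].append(y)
--         in_degree[y] += 1
--         if x not in in_degree:
--             in_degree[x] = 0
--
--     return graph, in_degree
--
-- def is_update_in_order(update, graph, in_degree):
--     # Create a mapping from page number to its position in the update
--     position = {page: idx for idx, page in enumerate(update)}
--
--     # Check the ordering constraints
--     for u in update:
--         for v in graph[u]: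
--             if v in position and position[u] > position[v]:
--                 return False
--     return True
--
-- def process_task(rules, updates):
--     graph, in_degree = build_graph(rules)
--     results = []
--     correct_orders = []
--     incorrect_orders = []
--
--     for update in updates:
--         if is_update_in_order(update, graph, in_degree):
--             results.append("yo")
--             correct_orders.append(update)
--         else:
--             results.append("notyo")
--             incorrect_orders.append(update)
--
--     return results, correct_orders, incorrect_orders
-- ===== SOURCE B (Python) =====
-- def process_task(rules, updates):
--     def ok(update):
--         pos = {p: i for i, p in enumerate(update)}
--         return all(not (x in pos and y in pos and pos[x] > pos[y]) for x, y in rules)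
--     results = ["yo" if ok(u) else "notyo" for u in updates]
--     correct_orders = [u for u in updates if ok(u)]
--     incorrect_orders = [u for u in updates if not ok(u)]
--     return results, correct_orders, incorrect_orders
-- ===== Notes on version B (the rewrite author's own statement) =====
-- stated objective: simpler
-- what changed: B drops the adjacency-graph/in-degree construction and the per-page out-edge scan: each update is checked directly against the rule list via its page-to-last-position map, and the three outputs are built by map/filter comprehensions instead of one accumulating loop.
import Mathlib
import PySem

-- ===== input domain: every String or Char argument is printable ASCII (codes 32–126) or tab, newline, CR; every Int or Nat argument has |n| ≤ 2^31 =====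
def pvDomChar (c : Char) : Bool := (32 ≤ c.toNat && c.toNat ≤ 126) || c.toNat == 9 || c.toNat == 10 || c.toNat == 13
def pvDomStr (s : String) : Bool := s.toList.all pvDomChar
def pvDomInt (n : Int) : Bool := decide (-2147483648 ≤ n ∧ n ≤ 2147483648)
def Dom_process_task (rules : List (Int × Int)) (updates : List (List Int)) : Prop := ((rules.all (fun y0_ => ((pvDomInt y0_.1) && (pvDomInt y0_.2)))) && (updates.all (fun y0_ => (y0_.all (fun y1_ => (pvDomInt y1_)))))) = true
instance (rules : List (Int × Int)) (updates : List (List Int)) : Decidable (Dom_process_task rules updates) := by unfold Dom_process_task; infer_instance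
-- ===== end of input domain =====

-- B checks each update directly against the rule list via its last-position map and builds the
-- three outputs by map/filter, instead of A's adjacency graph / in-degree and accumulating loop (simpler).


-- ===== PORT A =====
def build_graph (rules : List (Int × Int)) : PySem.Dict Int (List Int) × PySem.Dict Int Int :=
  rules.foldl (fun gd r =>
    let g := gd.1.modify r.1 [] (· ++ [r.2])
    let d := gd.2.modify r.2 0 (· + 1)
    let d := if d.contains r.1 then d else d.insert r.1 0
    (g, d)) (PySem.Dict.empty, PySem.Dict.empty)

def is_update_in_order (update : List Int) (graph : PySem.Dict Int (List Int))
    (_in_degree : PySem.Dict Int Int) : Bool :=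
  let position := (PySem.List.enumerate update 0).foldl (fun d p => d.insert p.2 p.1) PySem.Dict.empty
  !(update.any fun u => (graph.getD u []).any fun v =>
      position.contains v && decide (position.getD u 0 > position.getD v 0))

def process_task (rules : List (Int × Int)) (updates : List (List Int)) : List String × List (List Int) × List (List Int) :=
  let gd := build_graph rules
  updates.foldl (fun acc update =>
    if is_update_in_order update gd.1 gd.2 then
      (acc.1 ++ ["yo"], acc.2.1 ++ [update], acc.2.2)
    else
      (acc.1 ++ ["notyo"], acc.2.1, acc.2.2 ++ [update])) ([], [], [])

-- ===== PORT B =====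
def update_ok (rules : List (Int × Int)) (update : List Int) : Bool :=
  let pos := (PySem.List.enumerate update 0).foldl (fun d p => d.insert p.2 p.1) PySem.Dict.empty
  rules.all fun r =>
    !(pos.contains r.1 && pos.contains r.2 && decide (pos.getD r.1 0 > pos.getD r.2 0))

def process_task_alt (rules : List (Int × Int)) (updates : List (List Int)) : List String × List (List Int) × List (List Int) :=
  (updates.map (fun u => if update_ok rules u then "yo" else "notyo"),
   updates.filter (fun u => update_ok rules u),
   updates.filter (fun u => !update_ok rules u))

-- ===== PRECONDITION & SPEC =====
def Spec_process_task (rules : List (Int × Int)) (updates : List (List Int)) (out : List String × List (List Int) × List (List Int)) : Prop := out = process_task_alt rules updates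
instance (rules : List (Int × Int)) (updates : List (List Int)) (out : List String × List (List Int) × List (List Int)) : Decidable (Spec_process_task rules updates out) := by unfold Spec_process_task; infer_instance

-- ===== CLAIM (what is proved, stated in full; the proofs are below) =====
def Claim_equal_process_task : Prop := ∀ (rules : List (Int × Int)) (updates : List (List Int)), Dom_process_task rules updates → Spec_process_task rules updates (process_task rules updates)

-- ===== LEMMAS AND PROOFS =====

-- the graph component of build_graph is the plain grouping fold
theorem build_graph_fst (rules : List (Int × Int)) :
    (build_graph rules).1 = rules.foldl (fun d p => d.modify p.1 [] (· ++ [p.2])) PySem.Dict.empty := by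
  unfold build_graph
  suffices h : ∀ (l : List (Int × Int)) (gd : PySem.Dict Int (List Int) × PySem.Dict Int Int),
      (l.foldl (fun gd r =>
        let g := gd.1.modify r.1 [] (· ++ [r.2])
        let d := gd.2.modify r.2 0 (· + 1)
        let d := if d.contains r.1 then d else d.insert r.1 0
        (g, d)) gd).1 = l.foldl (fun d p => d.modify p.1 [] (· ++ [p.2])) gd.1 by
    exact h rules _
  intro l
  induction l with
  | nil => intro gd; rfl
  | cons r t ih => intro gd; simp only [List.foldl_cons]; exact ih _

theorem mem_graph_getD (rules : List (Int × Int)) (u v : Int) :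
    v ∈ (build_graph rules).1.getD u [] ↔ (u, v) ∈ rules := by
  rw [build_graph_fst, PySem.Dict.getD_foldl_modify_append]
  simp only [PySem.Dict.getD_empty, List.nil_append, List.mem_map, List.mem_filter, beq_iff_eq]
  constructor
  · rintro ⟨p, ⟨hp, h1⟩, h2⟩
    have : p = (u, v) := by cases p; simp_all
    exact this ▸ hp
  · intro h; exact ⟨(u, v), ⟨h, rfl⟩, rfl⟩

theorem contains_pos (update : List Int) (x : Int) :
    ((PySem.List.enumerate update 0).foldl (fun d p => d.insert p.2 p.1)
      (PySem.Dict.empty : PySem.Dict Int Int)).contains x = decide (x ∈ update) := by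
  rw [PySem.Dict.contains_eq_decide_mem_keys]
  have hk := PySem.Dict.keys_foldl_insert_key (l := PySem.List.enumerate update 0)
      (key := fun p => p.2) (f := fun d p => p.1) (d := (PySem.Dict.empty : PySem.Dict Int Int))
  simp only [hk, PySem.Dict.keys_empty]
  have hmap : (PySem.List.enumerate update 0).map (fun p => p.2) = update :=
    PySem.List.map_snd_enumerate update 0
  rw [hmap]
  simp [PySem.Set.mem_update]

-- the per-update checks agree
theorem check_eq (rules : List (Int × Int)) (update : List Int) :
    is_update_in_order update (build_graph rules).1 (build_graph rules).2 = update_ok rules update := by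
  unfold is_update_in_order update_ok
  rw [Bool.eq_iff_iff]
  simp only [Bool.not_eq_true', List.any_eq_false, List.all_eq_true, Bool.not_eq_true,
    Bool.and_eq_false_iff, decide_eq_false_iff_not, contains_pos, not_lt]
  constructor
  · intro h r hr
    by_cases h1 : r.1 ∈ update
    · rcases h r.1 h1 r.2 ((mem_graph_getD rules r.1 r.2).mpr hr) with h2 | h2
      · exact Or.inl (Or.inr h2)
      · exact Or.inr h2
    · exact Or.inl (Or.inl h1)
  · intro h u hu v hv
    rcases h (u, v) ((mem_graph_getD rules u v).mp hv) with (h1 | h1) | h1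
    · exact absurd hu h1
    · exact Or.inl h1
    · exact Or.inr h1

-- the accumulating loop over updates produces the map/filter/filter triple
theorem foldl_triple (ok : List Int → Bool) (updates : List (List Int))
    (acc : List String × List (List Int) × List (List Int)) :
    updates.foldl (fun acc update =>
      if ok update then (acc.1 ++ ["yo"], acc.2.1 ++ [update], acc.2.2)
      else (acc.1 ++ ["notyo"], acc.2.1, acc.2.2 ++ [update])) acc =
    (acc.1 ++ updates.map (fun u => if ok u then "yo" else "notyo"),
     acc.2.1 ++ updates.filter (fun u => ok u),
     acc.2.2 ++ updates.filter (fun u => !ok u)) := by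
  induction updates generalizing acc with
  | nil => simp
  | cons u t ih =>
    simp only [List.foldl_cons, List.map_cons, List.filter_cons]
    by_cases h : ok u <;> simp [h, ih, List.append_assoc]

-- ===== VERDICT (by name: the statement is the Claim_ definition above) =====
theorem process_task_spec : Claim_equal_process_task := by
  intro rules updates _
  unfold Spec_process_task process_task process_task_alt
  rw [foldl_triple (is_update_in_order · (build_graph rules).1 (build_graph rules).2) updates ([], [], [])]
  simp only [List.nil_append, check_eq]
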